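-- pv_equiv track=rewrite | github.com/antilneeraj/GFG-POTD | POTD Solutions/05_04_2023_CountSpecialNum.py | countSpecialNumbers
-- ===== SOURCE A (Python) =====
-- def countSpecialNumbers(N, arr):
--     freq = {}
--     uniq = set()
--     maximum = 0
--
--     for i in range(N):
--         freq[arr[i]] = freq.get(arr[i], 0) + 1
--         uniq.add(arr[i])
--         maximum = max(maximum, arr[i])
--
--     special = set()
--     for z in uniq:
--         for i in range(2 * z, maximum+1, z):
--             if i in uniq:
--                 special.add(i)
--
--     ans = 0
--     for x in freq.items():
--         if x[1] > 1:
--             ans += x[1]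
--         elif x[0] in special:
--             ans += 1
--
--     return ans
-- ===== SOURCE B (Python) =====
-- def _divisorIn(x, s):
--     # some divisor pair (d, x//d) of x with 2 <= d <= sqrt(x) has a member in s
--     d = 2
--     while d * d <= x:
--         if x % d == 0 and (d in s or x // d in s):
--             return True
--         d += 1
--     return False
--
-- def countSpecialNumbers(N, arr):
--     # Count occurrences of the first N elements; no sieve up to the maximum value:
--     # a unique element x is special iff some smaller positive element divides it,
--     # found by trial division up to sqrt(x) against the table of seen values.
--     freq = {}
--     for i in range(N):
--         x = arr[i]
--         freq[x] = freq.get(x, 0) + 1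
--     ans = 0
--     for x, c in freq.items():
--         if c > 1:
--             ans += c
--         elif x > 1 and (1 in freq or _divisorIn(x, freq)):
--             ans += 1
--     return ans
-- ===== Notes on version B (the rewrite author's own statement) =====
-- stated objective: alternative
-- what changed: B replaces A's sieve (enumerating every multiple of every distinct value up to the maximum to build a 'special' set) by per-unique-element trial division up to sqrt(x) with membership tests in the table of seen values, so its cost does not depend on the magnitude of the maximum value.
-- crash fix: On inputs whose first N elements contain a 0, A raises ValueError (range() with step 0) while B returns the ordinary count, since 0 is never special and duplicates of 0 count as usual. — e.g. on countSpecialNumbers(2, [0, 3]): A raises ValueError, B returns 0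
import Mathlib
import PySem

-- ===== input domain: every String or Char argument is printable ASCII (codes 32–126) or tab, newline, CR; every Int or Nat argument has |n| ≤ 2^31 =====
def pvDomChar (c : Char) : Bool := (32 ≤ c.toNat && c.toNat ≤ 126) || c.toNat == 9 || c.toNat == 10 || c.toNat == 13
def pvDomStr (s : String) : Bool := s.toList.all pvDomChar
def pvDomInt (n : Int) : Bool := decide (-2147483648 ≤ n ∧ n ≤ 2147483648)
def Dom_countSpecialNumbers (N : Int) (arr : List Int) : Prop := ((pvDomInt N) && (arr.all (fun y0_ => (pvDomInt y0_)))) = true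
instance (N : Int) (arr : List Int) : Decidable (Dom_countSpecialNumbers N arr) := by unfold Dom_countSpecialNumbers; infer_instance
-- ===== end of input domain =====

-- B drops A's multiples sieve (which scans up to the maximum value) and instead tests each
-- unique element for a smaller positive divisor among the distinct values; same results.

-- ===== PORT A =====
def countSpecialNumbers (N : Int) (arr : List Int) : Int :=
  -- for i in range(N): freq[arr[i]] += 1; uniq.add(arr[i]); maximum = max(maximum, arr[i])
  let st := (PySem.List.pyRange 0 N 1).foldl
    (fun (st : PySem.Dict Int Int × PySem.Set Int × Int) i =>
      let x := PySem.List.pyGetD arr i 0   -- arr[i]; exact under Pre_ (0 ≤ i < N ≤ len arr)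
      (st.1.modify x 0 (fun c => c + 1), PySem.Set.add st.2.1 x, max st.2.2 x))
    (PySem.Dict.empty, PySem.Set.empty, 0)
  let freq := st.1
  let uniq := st.2.1
  let maximum := st.2.2
  -- for z in uniq: for i in range(2*z, maximum+1, z): if i in uniq: special.add(i)
  let special := uniq.foldl
    (fun sp z =>
      (PySem.List.pyRange (2 * z) (maximum + 1) z).foldl
        (fun sp i => if PySem.Set.contains uniq i then PySem.Set.add sp i else sp) sp)
    PySem.Set.empty
  -- for x in freq.items(): …
  freq.items.foldl
    (fun ans x =>
      if x.2 > 1 then ans + x.2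
      else if PySem.Set.contains special x.1 then ans + 1
      else ans) 0

-- ===== PORT B =====
-- while d * d <= x: if x % d == 0 and (d in s or x // d in s): return True; d += 1
-- (fuel only makes the recursion structural; x.toNat + 1 steps always suffice)
def pvDivisorIn (x : Int) (s : PySem.Dict Int Int) (fuel : Nat) (d : Int) : Bool :=
  match fuel with
  | 0 => false
  | fuel + 1 =>
    if d * d ≤ x then
      if PySem.Int.mod x d == 0 && (s.contains d || s.contains (PySem.Int.floordiv x d)) then true
      else pvDivisorIn x s fuel (d + 1)
    else false

def countSpecialNumbers_alt (N : Int) (arr : List Int) : Int :=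
  let freq := (PySem.List.pyRange 0 N 1).foldl
    (fun (d : PySem.Dict Int Int) i =>
      d.modify (PySem.List.pyGetD arr i 0) 0 (fun c => c + 1))   -- arr[i]; exact under Pre_
    PySem.Dict.empty
  freq.items.foldl
    (fun ans x =>
      if x.2 > 1 then ans + x.2
      else if decide (x.1 > 1) && (freq.contains 1 || pvDivisorIn x.1 freq (x.1.toNat + 1) 2) then ans + 1
      else ans) 0

-- ===== PRECONDITION & SPEC =====
-- Pre_ is exactly where A returns: N > len(arr) raises IndexError at arr[i], and a 0 among the
-- first N elements raises ValueError at range(2*0, maximum+1, 0).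
def Pre_countSpecialNumbers (N : Int) (arr : List Int) : Prop :=
  N ≤ (arr.length : Int) ∧ (0 : Int) ∉ arr.take N.toNat
instance (N : Int) (arr : List Int) : Decidable (Pre_countSpecialNumbers N arr) := by
  unfold Pre_countSpecialNumbers; infer_instance
def pvWitness_countSpecialNumbers : Int × List Int := (3, [4, 2, 2])

-- On inputs with a 0 among the first N elements A raises ValueError (range step 0) while B
-- simply returns the count (0 is never "special": it has no positive divisor smaller than itself).
def Raises_countSpecialNumbers (N : Int) (arr : List Int) : Prop :=
  N ≤ (arr.length : Int) ∧ (0 : Int) ∈ arr.take N.toNat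
instance (N : Int) (arr : List Int) : Decidable (Raises_countSpecialNumbers N arr) := by
  unfold Raises_countSpecialNumbers; infer_instance
def pvRaiseWitness_countSpecialNumbers : Int × List Int := (2, [0, 3])
def pvRaiseWitnessOut_countSpecialNumbers : Int := 0

def Spec_countSpecialNumbers (N : Int) (arr : List Int) (out : Int) : Prop := out = countSpecialNumbers_alt N arr
instance (N : Int) (arr : List Int) (out : Int) : Decidable (Spec_countSpecialNumbers N arr out) := by unfold Spec_countSpecialNumbers; infer_instance

-- ===== CLAIM (what is proved, stated in full; the proofs are below) =====
def Claim_equal_countSpecialNumbers : Prop := ∀ (N : Int) (arr : List Int), Dom_countSpecialNumbers N arr → Pre_countSpecialNumbers N arr → Spec_countSpecialNumbers N arr (countSpecialNumbers N arr)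

def Claim_raises_countSpecialNumbers : Prop := (∀ (N : Int) (arr : List Int), Dom_countSpecialNumbers N arr → Raises_countSpecialNumbers N arr → ¬ Pre_countSpecialNumbers N arr) ∧ (Dom_countSpecialNumbers (pvRaiseWitness_countSpecialNumbers.1) (pvRaiseWitness_countSpecialNumbers.2) ∧ Raises_countSpecialNumbers (pvRaiseWitness_countSpecialNumbers.1) (pvRaiseWitness_countSpecialNumbers.2) ∧ countSpecialNumbers_alt (pvRaiseWitness_countSpecialNumbers.1) (pvRaiseWitness_countSpecialNumbers.2) = pvRaiseWitnessOut_countSpecialNumbers)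

-- ===== LEMMAS AND PROOFS =====

lemma pv_mem_addIf (U : PySem.Set Int) (l : List Int) (sp : PySem.Set Int) (x : Int) :
    x ∈ l.foldl (fun sp i => if PySem.Set.contains U i then PySem.Set.add sp i else sp) sp ↔
      x ∈ sp ∨ (x ∈ l ∧ x ∈ U) := by
  induction l generalizing sp with
  | nil => simp
  | cons a l ih =>
    simp only [List.foldl_cons]
    by_cases h : PySem.Set.contains U a
    · rw [if_pos h, ih]
      rw [PySem.Set.contains_iff] at h
      simp only [PySem.Set.mem_add, List.mem_cons]
      constructor
      · rintro ((hs | rfl) | ⟨hl, hU⟩)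
        · exact Or.inl hs
        · exact Or.inr ⟨Or.inl rfl, h⟩
        · exact Or.inr ⟨Or.inr hl, hU⟩
      · rintro (hs | ⟨(rfl | hl), hU⟩)
        · exact Or.inl (Or.inl hs)
        · exact Or.inl (Or.inr rfl)
        · exact Or.inr ⟨hl, hU⟩
    · rw [if_neg h, ih]
      rw [PySem.Set.contains_iff] at h
      simp only [List.mem_cons]
      constructor
      · rintro (hs | ⟨hl, hU⟩)
        · exact Or.inl hs
        · exact Or.inr ⟨Or.inr hl, hU⟩
      · rintro (hs | ⟨(rfl | hl), hU⟩)
        · exact Or.inl hs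
        · exact absurd hU h
        · exact Or.inr ⟨hl, hU⟩

lemma pv_mem_special (U : PySem.Set Int) (M : Int) (zs : List Int) (sp : PySem.Set Int) (x : Int) :
    x ∈ zs.foldl (fun sp z => (PySem.List.pyRange (2*z) (M+1) z).foldl
        (fun sp i => if PySem.Set.contains U i then PySem.Set.add sp i else sp) sp) sp ↔
      x ∈ sp ∨ ∃ z ∈ zs, x ∈ PySem.List.pyRange (2*z) (M+1) z ∧ x ∈ U := by
  induction zs generalizing sp with
  | nil => simp
  | cons a zs ih =>
    simp only [List.foldl_cons]
    rw [ih, pv_mem_addIf]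
    simp only [List.mem_cons]
    constructor
    · rintro ((hs | ⟨hr, hU⟩) | ⟨z, hz, hr, hU⟩)
      · exact Or.inl hs
      · exact Or.inr ⟨a, Or.inl rfl, hr, hU⟩
      · exact Or.inr ⟨z, Or.inr hz, hr, hU⟩
    · rintro (hs | ⟨z, (rfl | hz), hr, hU⟩)
      · exact Or.inl (Or.inl hs)
      · exact Or.inl (Or.inr ⟨hr, hU⟩)
      · exact Or.inr ⟨z, hz, hr, hU⟩

lemma pv_range_iff (P : List Int) (k z : Int) (hk : k ∈ P) (hz : z ∈ P) (h0 : (0:Int) ∉ P) :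
    k ∈ PySem.List.pyRange (2*z) ((P.foldl max 0)+1) z ↔ (0 < z ∧ z < k ∧ z ∣ k) := by
  have hM0 : 0 ≤ P.foldl max 0 := (PySem.List.le_foldl_max P 0).1
  have hzne : z ≠ 0 := fun h => h0 (h ▸ hz)
  rcases lt_or_gt_of_ne hzne with hneg | hpos
  · rw [PySem.List.pyRange_of_neg _ _ hneg]
    rw [if_neg (by omega)]
    simp
    omega
  · rw [PySem.List.mem_pyRange_iff_of_pos hpos]
    have hkM : k ≤ P.foldl max 0 := (PySem.List.le_foldl_max P 0).2 k hk
    constructor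
    · rintro ⟨h1, h2, c, hc⟩
      refine ⟨hpos, by omega, ⟨c + 2, by linarith⟩⟩
    · rintro ⟨_, hzk, c, hc⟩
      have hc2 : 2 ≤ c := by nlinarith
      refine ⟨by nlinarith, by omega, ⟨c - 2, by linarith⟩⟩

lemma pv_divisorIn_iff (x : Int) (s : PySem.Dict Int Int) (fuel : Nat) (d : Int)
    (hd : 2 ≤ d) (hfuel : (x - d).toNat < fuel) :
    pvDivisorIn x s fuel d = true ↔
      ∃ e : Int, d ≤ e ∧ e * e ≤ x ∧ e ∣ x ∧
        (s.contains e = true ∨ s.contains (PySem.Int.floordiv x e) = true) := by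
  induction fuel generalizing d with
  | zero => exact absurd hfuel (Nat.not_lt_zero _)
  | succ fuel ih =>
    show (if d * d ≤ x then
        if PySem.Int.mod x d == 0 && (s.contains d || s.contains (PySem.Int.floordiv x d)) then true
        else pvDivisorIn x s fuel (d + 1)
      else false) = true ↔ _
    by_cases hx : d * d ≤ x
    · rw [if_pos hx]
      have hdx : d < x := by nlinarith
      by_cases hc : (PySem.Int.mod x d == 0 && (s.contains d || s.contains (PySem.Int.floordiv x d))) = true
      · rw [if_pos hc]
        simp only [Bool.and_eq_true, Bool.or_eq_true, beq_iff_eq] at hc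
        simp only [true_iff]
        exact ⟨d, le_refl d, hx, (PySem.Int.mod_eq_zero_iff_dvd x d).1 hc.1, hc.2⟩
      · rw [if_neg hc, ih (d + 1) (by omega) (by omega)]
        simp only [Bool.and_eq_true, Bool.or_eq_true, beq_iff_eq] at hc
        replace hc : PySem.Int.mod x d = 0 →
            (¬ s.contains d = true) ∧ (¬ s.contains (PySem.Int.floordiv x d) = true) :=
          fun hm => ⟨fun hb => hc ⟨hm, Or.inl hb⟩, fun hb => hc ⟨hm, Or.inr hb⟩⟩
        constructor
        · rintro ⟨e, he, rest⟩; exact ⟨e, by omega, rest⟩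
        · rintro ⟨e, he, h1, h2, h3⟩
          refine ⟨e, ?_, h1, h2, h3⟩
          by_cases hde : e = d
          · subst hde
            exfalso
            rcases h3 with h3 | h3
            · exact absurd h3 (hc ((PySem.Int.mod_eq_zero_iff_dvd x e).2 h2)).1
            · exact absurd h3 (hc ((PySem.Int.mod_eq_zero_iff_dvd x e).2 h2)).2
          · omega
    · rw [if_neg hx]
      simp only [Bool.false_eq_true, false_iff]
      rintro ⟨e, he, hee, -, -⟩
      have : d * d ≤ e * e := by nlinarith
      omega

lemma pv_special_cond_iff (P : List Int) (k : Int) :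
    (decide (k > 1) && ((PySem.Dict.counter P).contains 1 || pvDivisorIn k (PySem.Dict.counter P) (k.toNat + 1) 2)) = true
      ↔ ∃ z ∈ P, 0 < z ∧ z < k ∧ z ∣ k := by
  simp only [Bool.and_eq_true, Bool.or_eq_true, decide_eq_true_eq, PySem.Dict.contains_counter,
    List.contains_iff_mem]
  constructor
  · rintro ⟨hk1, h1 | hdiv⟩
    · exact ⟨1, h1, by omega, by omega, one_dvd k⟩
    · rw [pv_divisorIn_iff k _ (k.toNat + 1) 2 (by omega) (by omega)] at hdiv
      obtain ⟨e, he2, hee, hdvd, hmem⟩ := hdiv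
      simp only [PySem.Dict.contains_counter, List.contains_iff_mem] at hmem
      have hek : e < k := by nlinarith
      rcases hmem with hmem | hmem
      · exact ⟨e, hmem, by omega, hek, hdvd⟩
      · obtain ⟨m, hm⟩ := hdvd
        have hfd : PySem.Int.floordiv k e = m := by
          rw [PySem.Int.floordiv_eq_iff_of_pos (by omega)]
          constructor <;> nlinarith
        rw [hfd] at hmem
        have hm0 : 0 < m := by nlinarith
        have hmk : m < k := by nlinarith
        exact ⟨m, hmem, hm0, hmk, ⟨e, by linarith [hm]⟩⟩
  · rintro ⟨z, hz, hz0, hzk, m, hm⟩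
    have hk1 : 1 < k := by nlinarith
    refine ⟨hk1, ?_⟩
    by_cases hz1 : z = 1
    · exact Or.inl (hz1 ▸ hz)
    · right
      rw [pv_divisorIn_iff k _ (k.toNat + 1) 2 (by omega) (by omega)]
      have hm2 : 2 ≤ m := by nlinarith
      by_cases hzz : z * z ≤ k
      · refine ⟨z, by omega, hzz, ⟨m, hm⟩, Or.inl ?_⟩
        simp only [PySem.Dict.contains_counter, List.contains_iff_mem]
        exact hz
      · refine ⟨m, hm2, by nlinarith, ⟨z, by linarith [hm]⟩, Or.inr ?_⟩
        have hfd : PySem.Int.floordiv k m = z := by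
          rw [PySem.Int.floordiv_eq_iff_of_pos (by omega)]
          constructor <;> nlinarith
        rw [hfd]
        simp only [PySem.Dict.contains_counter, List.contains_iff_mem]
        exact hz

lemma pv_cond_eq (P : List Int) (k : Int) (h0 : (0:Int) ∉ P) (hk : k ∈ P) :
    PySem.Set.contains
      ((PySem.Set.ofList P).foldl (fun sp z =>
        (PySem.List.pyRange (2*z) ((P.foldl max 0)+1) z).foldl
          (fun sp i => if PySem.Set.contains (PySem.Set.ofList P) i then PySem.Set.add sp i else sp) sp)
        PySem.Set.empty) k
    = (decide (k > 1) && ((PySem.Dict.counter P).contains 1 || pvDivisorIn k (PySem.Dict.counter P) (k.toNat + 1) 2)) := by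
  rw [Bool.eq_iff_iff, PySem.Set.contains_iff, pv_mem_special, pv_special_cond_iff]
  constructor
  · rintro (hs | ⟨z, hz, hr, -⟩)
    · simp [PySem.Set.empty] at hs
    · have hzP : z ∈ P := (PySem.Set.mem_ofList P z).1 hz
      refine ⟨z, hzP, ?_⟩
      rw [pv_range_iff P k z hk hzP h0] at hr
      exact hr
  · rintro ⟨z, hz, hcond⟩
    exact Or.inr ⟨z, (PySem.Set.mem_ofList P z).2 hz,
      (pv_range_iff P k z hk hz h0).2 hcond, (PySem.Set.mem_ofList P k).2 hk⟩

-- ===== VERDICT (by name: the statement is the Claim_ definition above) =====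
theorem countSpecialNumbers_spec : Claim_equal_countSpecialNumbers := by
  intro N arr _ hPre
  obtain ⟨hNle, h0⟩ := hPre
  simp only [Spec_countSpecialNumbers, countSpecialNumbers, countSpecialNumbers_alt]
  by_cases hN : N ≤ 0
  · rw [PySem.List.pyRange_one_eq_nil hN]
    rfl
  · replace hN : (0:Int) < N := by omega
    have hn : N = (N.toNat : Int) := (Int.toNat_of_nonneg (le_of_lt hN)).symm
    set P := arr.take N.toNat with hPdef
    have hPlen : P.length = N.toNat := by
      rw [hPdef, List.length_take]; omega
    have hread : (PySem.List.pyRange 0 N 1).foldl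
        (fun (st : PySem.Dict Int Int × PySem.Set Int × Int) i =>
          (st.1.modify (PySem.List.pyGetD arr i 0) 0 (fun c => c + 1),
           PySem.Set.add st.2.1 (PySem.List.pyGetD arr i 0),
           max st.2.2 (PySem.List.pyGetD arr i 0)))
        (PySem.Dict.empty, PySem.Set.empty, 0)
      = P.foldl (fun (st : PySem.Dict Int Int × PySem.Set Int × Int) x =>
          (st.1.modify x 0 (fun c => c + 1), PySem.Set.add st.2.1 x, max st.2.2 x))
          (PySem.Dict.empty, PySem.Set.empty, 0) := by
      rw [PySem.List.foldl_congr_mem _ _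
          (fun (st : PySem.Dict Int Int × PySem.Set Int × Int) i =>
            (st.1.modify (PySem.List.pyGetD P i 0) 0 (fun c => c + 1),
             PySem.Set.add st.2.1 (PySem.List.pyGetD P i 0),
             max st.2.2 (PySem.List.pyGetD P i 0))) _ ?_]
      · have hNP : N = (P.length : Int) := by rw [hPlen]; exact hn
        rw [hNP]
        exact PySem.List.foldl_pyRange_zero_pyGetD' P 0
          (fun (st : PySem.Dict Int Int × PySem.Set Int × Int) x =>
            (st.1.modify x 0 (fun c => c + 1), PySem.Set.add st.2.1 x, max st.2.2 x))
          (PySem.Dict.empty, PySem.Set.empty, 0)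
      · intro acc i hi
        rw [PySem.List.mem_pyRange_one] at hi
        have hget : PySem.List.pyGetD arr i 0 = PySem.List.pyGetD P i 0 := by
          rw [PySem.List.pyGetD_of_nonneg _ _ hi.1, PySem.List.pyGetD_of_nonneg _ _ hi.1,
            List.getD_eq_getElem?_getD, List.getD_eq_getElem?_getD, hPdef,
            List.getElem?_take_of_lt (by omega)]
        rw [hget]
    rw [hread,
      PySem.List.foldl_prod_mk (f := fun (d : PySem.Dict Int Int) (x : Int) => d.modify x 0 (fun c => c + 1))
        (g := fun (s2 : PySem.Set Int × Int) (x : Int) => (PySem.Set.add s2.1 x, max s2.2 x)),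
      PySem.List.foldl_prod_mk (f := fun (s : PySem.Set Int) (x : Int) => PySem.Set.add s x)
        (g := fun (m : Int) (x : Int) => max m x)]
    dsimp only
    have hMax : List.foldl (fun (m : Int) x => max m x) 0 P = List.foldl max 0 P := rfl
    have hU : List.foldl (fun (s : PySem.Set Int) x => PySem.Set.add s x) PySem.Set.empty P
        = PySem.Set.ofList P := (PySem.Set.ofList_eq_foldl P).symm
    have hC : List.foldl (fun (d : PySem.Dict Int Int) x => d.modify x 0 (fun c => c + 1))
        PySem.Dict.empty P = PySem.Dict.counter P := (PySem.Dict.counter_eq_foldl P).symm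
    have hreadB : (PySem.List.pyRange 0 N 1).foldl
        (fun (d : PySem.Dict Int Int) i =>
          d.modify (PySem.List.pyGetD arr i 0) 0 (fun c => c + 1)) PySem.Dict.empty
      = P.foldl (fun (d : PySem.Dict Int Int) x => d.modify x 0 (fun c => c + 1))
          PySem.Dict.empty := by
      rw [PySem.List.foldl_congr_mem _ _
          (fun (d : PySem.Dict Int Int) i =>
            d.modify (PySem.List.pyGetD P i 0) 0 (fun c => c + 1)) _ ?_]
      · have hNP : N = (P.length : Int) := by rw [hPlen]; exact hn
        rw [hNP]
        exact PySem.List.foldl_pyRange_zero_pyGetD' P 0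
          (fun (d : PySem.Dict Int Int) x => d.modify x 0 (fun c => c + 1)) PySem.Dict.empty
      · intro acc i hi
        rw [PySem.List.mem_pyRange_one] at hi
        have hget : PySem.List.pyGetD arr i 0 = PySem.List.pyGetD P i 0 := by
          rw [PySem.List.pyGetD_of_nonneg _ _ hi.1, PySem.List.pyGetD_of_nonneg _ _ hi.1,
            List.getD_eq_getElem?_getD, List.getD_eq_getElem?_getD, hPdef,
            List.getElem?_take_of_lt (by omega)]
        rw [hget]
    rw [hMax, hU, hC, hreadB, hC]
    have h0P : (0 : Int) ∉ P := h0
    apply PySem.List.foldl_congr_mem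
    intro acc x hx
    have hk1 : x.1 ∈ P := by
      have hmem := PySem.Dict.mem_keys_of_mem_items _ hx
      rw [PySem.Dict.keys_counter, PySem.Set.mem_ofList] at hmem
      exact hmem
    rw [pv_cond_eq P x.1 h0P hk1]

@[simp]
theorem countSpecialNumbers_raises : Claim_raises_countSpecialNumbers := by
  unfold Claim_raises_countSpecialNumbers
  refine ⟨?_, by decide⟩
  rintro N arr _ ⟨-, h0⟩ ⟨-, hnot⟩
  exact hnot h0
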